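-- pv_equiv track=rewrite | github.com/Manguil/fds | L2/S4/Algoritmique/TP1Exo2Emetteurs.py | choixMaison
-- ===== SOURCE A (Python) =====
-- def Couvre(Maison,i,j):
--     return (Maison[i][0]-Maison[j][0])**2+(Maison[i][1]-Maison[j][1])**2 <= rayon**2
--
-- def dansRayon(Maison, i):
--     maxMaisonRayon = 0
--     for j in range(len(Maison)):
--         if Couvre(Maison, i, j):
--             maxMaisonRayon += 1
--     return maxMaisonRayon
--
-- def choixMaison(Maison,MaisonsRestantes):#MaisonsRestantes[i]=0 ssi i n'est pas couverte
--     i0=-1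
--     maxMaisonRayon = 0
--     for i in range(len(Maison)):
--         if MaisonsRestantes[i]==0 and i0==-1 and maxMaisonRayon < dansRayon(Maison, i):
--             i0=i
--             maxMaisonRayon = dansRayon(Maison, i)
--     return i0
--
-- rayon=200 # rayon de l'émetteur
-- ===== SOURCE B (Python) =====
-- def choixMaison(Maison, MaisonsRestantes):
--     # first uncovered house: dansRayon(Maison, i) always counts house i itself,
--     # so A's condition collapses to "first index with MaisonsRestantes[i] == 0"
--     return next((i for i in range(len(Maison)) if MaisonsRestantes[i] == 0), -1)
-- ===== Notes on version B (the rewrite author's own statement) =====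
-- stated objective: simpler
-- what changed: B returns the first index i in range(len(Maison)) with MaisonsRestantes[i]==0 (default -1), dropping the dansRayon/Couvre coverage computation entirely, since dansRayon(Maison,i) always counts house i itself and is therefore >= 1 > 0, making A's extra conjuncts vacuous.
import Mathlib
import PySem

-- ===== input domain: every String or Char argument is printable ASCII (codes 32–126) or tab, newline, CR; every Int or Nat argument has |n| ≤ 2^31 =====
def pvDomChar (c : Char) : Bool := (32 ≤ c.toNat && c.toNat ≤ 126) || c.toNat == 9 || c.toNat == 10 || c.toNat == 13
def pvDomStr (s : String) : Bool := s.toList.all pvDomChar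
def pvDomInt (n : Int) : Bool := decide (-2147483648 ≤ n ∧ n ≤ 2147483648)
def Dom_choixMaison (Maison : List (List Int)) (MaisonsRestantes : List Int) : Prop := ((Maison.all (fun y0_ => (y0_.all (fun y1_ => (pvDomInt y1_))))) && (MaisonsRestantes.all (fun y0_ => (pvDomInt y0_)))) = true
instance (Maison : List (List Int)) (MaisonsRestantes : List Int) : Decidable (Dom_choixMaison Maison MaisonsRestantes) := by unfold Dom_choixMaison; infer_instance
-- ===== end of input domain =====

-- B drops the dansRayon/Couvre coverage computation: dansRayon always counts house i itself,
-- so A reduces to "first index with MaisonsRestantes[i] == 0"; B is that single linear scan.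


-- ===== PORT A =====
def Couvre (Maison : List (List Int)) (i j : Int) : Bool :=
  let ri := PySem.List.pyGetD Maison i []
  let rj := PySem.List.pyGetD Maison j []
  decide ((PySem.List.pyGetD ri 0 0 - PySem.List.pyGetD rj 0 0)^2
        + (PySem.List.pyGetD ri 1 0 - PySem.List.pyGetD rj 1 0)^2 ≤ 200^2)

def dansRayon (Maison : List (List Int)) (i : Int) : Int :=
  (PySem.List.pyRange 0 (Maison.length : Int) 1).foldl
    (fun acc j => if Couvre Maison i j then acc + 1 else acc) 0

def choixMaison (Maison : List (List Int)) (MaisonsRestantes : List Int) : Int :=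
  ((PySem.List.pyRange 0 (Maison.length : Int) 1).foldl
    (fun (s : Int × Int) i =>
      if PySem.List.pyGetD MaisonsRestantes i 0 == 0 && s.1 == -1 && decide (s.2 < dansRayon Maison i)
      then (i, dansRayon Maison i) else s)
    (-1, 0)).1

-- ===== PORT B =====
def firstZeroAux (MaisonsRestantes : List Int) : List Int → Int
  | [] => -1
  | i :: rest =>
      if PySem.List.pyGetD MaisonsRestantes i 0 == 0 then i
      else firstZeroAux MaisonsRestantes rest

def choixMaison_alt (Maison : List (List Int)) (MaisonsRestantes : List Int) : Int :=
  firstZeroAux MaisonsRestantes (PySem.List.pyRange 0 (Maison.length : Int) 1)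

-- ===== PRECONDITION & SPEC =====
-- Pre_ excludes exactly the inputs on which Python A raises IndexError: MaisonsRestantes
-- shorter than Maison, or an uncovered house exists while some row of Maison has < 2 coordinates.
def Pre_choixMaison (Maison : List (List Int)) (MaisonsRestantes : List Int) : Prop :=
  Maison.length ≤ MaisonsRestantes.length ∧
  ((0 : Int) ∈ MaisonsRestantes.take Maison.length → ∀ r ∈ Maison, 2 ≤ r.length)
instance (Maison : List (List Int)) (MaisonsRestantes : List Int) : Decidable (Pre_choixMaison Maison MaisonsRestantes) := by unfold Pre_choixMaison; infer_instance
def pvWitness_choixMaison : List (List Int) × List Int := ([[0, 0], [500, 0]], [1, 0])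

def Spec_choixMaison (Maison : List (List Int)) (MaisonsRestantes : List Int) (out : Int) : Prop := out = choixMaison_alt Maison MaisonsRestantes
instance (Maison : List (List Int)) (MaisonsRestantes : List Int) (out : Int) : Decidable (Spec_choixMaison Maison MaisonsRestantes out) := by unfold Spec_choixMaison; infer_instance

-- ===== CLAIM (what is proved, stated in full; the proofs are below) =====
def Claim_equal_choixMaison : Prop := ∀ (Maison : List (List Int)) (MaisonsRestantes : List Int), Dom_choixMaison Maison MaisonsRestantes → Pre_choixMaison Maison MaisonsRestantes → Spec_choixMaison Maison MaisonsRestantes (choixMaison Maison MaisonsRestantes)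

-- ===== LEMMAS AND PROOFS =====

-- a house always covers itself (the two rows fetched are the same row)
theorem couvre_self (M : List (List Int)) (i : Int) : Couvre M i i = true := by
  simp [Couvre]

theorem fold_count_ge (M : List (List Int)) (i : Int) :
    ∀ (L : List Int) (acc : Int),
      acc ≤ L.foldl (fun acc j => if Couvre M i j then acc + 1 else acc) acc := by
  intro L
  induction L with
  | nil => intro acc; simp
  | cons j rest ih =>
      intro acc
      simp only [List.foldl_cons]
      split
      · exact le_trans (by omega) (ih (acc + 1))
      · exact ih acc

theorem fold_count_pos (M : List (List Int)) (i : Int) :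
    ∀ (L : List Int) (acc : Int), i ∈ L → 0 ≤ acc →
      0 < L.foldl (fun acc j => if Couvre M i j then acc + 1 else acc) acc := by
  intro L
  induction L with
  | nil => intro acc h; simp at h
  | cons j rest ih =>
      intro acc hmem hacc
      simp only [List.foldl_cons]
      rcases List.mem_cons.mp hmem with h | h
      · subst h
        rw [couvre_self M i]
        simp only [if_true]
        have := fold_count_ge M i rest (acc + 1)
        omega
      · have hstep : (0 : Int) ≤ if Couvre M i j then acc + 1 else acc := by
          split <;> omega
        exact ih _ h hstep

theorem dansRayon_pos (M : List (List Int)) (i : Int)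
    (h : i ∈ PySem.List.pyRange 0 (M.length : Int) 1) : 0 < dansRayon M i :=
  fold_count_pos M i _ 0 h le_rfl

-- once i0 ≠ -1 the fold's state is frozen
theorem fold_frozen (M : List (List Int)) (MR : List Int) :
    ∀ (L : List Int) (s : Int × Int), s.1 ≠ -1 →
      L.foldl
        (fun (s : Int × Int) i =>
          if PySem.List.pyGetD MR i 0 == 0 && s.1 == -1 && decide (s.2 < dansRayon M i)
          then (i, dansRayon M i) else s) s = s := by
  intro L
  induction L with
  | nil => intro s _; simp
  | cons i rest ih =>
      intro s hs
      simp only [List.foldl_cons]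
      have : (s.1 == -1) = false := by simpa using hs
      rw [this]
      simp only [Bool.and_false, Bool.false_and]
      exact ih s hs

theorem fold_eq_firstZero (M : List (List Int)) (MR : List Int) :
    ∀ (L : List Int), (∀ j ∈ L, 0 ≤ j ∧ 0 < dansRayon M j) →
      (L.foldl
        (fun (s : Int × Int) i =>
          if PySem.List.pyGetD MR i 0 == 0 && s.1 == -1 && decide (s.2 < dansRayon M i)
          then (i, dansRayon M i) else s) (-1, 0)).1 = firstZeroAux MR L := by
  intro L
  induction L with
  | nil => intro _; simp [firstZeroAux]
  | cons i rest ih =>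
      intro hL
      obtain ⟨hi0, hid⟩ := hL i (List.mem_cons_self ..)
      simp only [List.foldl_cons, firstZeroAux]
      by_cases hz : PySem.List.pyGetD MR i 0 == 0
      · rw [if_pos hz]
        have hcond : (PySem.List.pyGetD MR i 0 == 0 && ((-1 : Int) == -1) && decide ((0 : Int) < dansRayon M i)) = true := by
          simp [hz, hid]
        simp only [hcond, if_pos]
        rw [fold_frozen M MR rest (i, dansRayon M i) (by simp; omega)]
      · have hzf : (PySem.List.pyGetD MR i 0 == 0) = false := by simpa using hz
        rw [if_neg (by simp [hzf])]
        rw [if_neg (by simp [hzf])]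
        exact ih (fun j hj => hL j (List.mem_cons_of_mem _ hj))

-- ===== VERDICT (by name: the statement is the Claim_ definition above) =====
theorem choixMaison_spec : Claim_equal_choixMaison := by
  intro M MR _ _
  unfold Spec_choixMaison choixMaison choixMaison_alt
  exact fold_eq_firstZero M MR _ (fun j hj =>
    ⟨(PySem.List.mem_pyRange_one.mp hj).1, dansRayon_pos M j hj⟩)
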